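-- pv_equiv track=rewrite | github.com/eduardocerqueira/seeker | seeker/snippet/prueba.py | marketing_name
-- ===== SOURCE A (Python) =====
-- mn_providers = [
--      'AADVANTAGE',
--      'CAIXA',
--      'DECOLAR',
--      'DOTZ',
--      'NEO',
--      'OUROCARD',
--      'PRIVATE',
--      'SANTANDER',
--      'SMILES'
--             ]
--
-- mn_levels = [
--     'BASICO',
--     'ELITE',
--     'FIT',
--     'GOLD',
--     'INTERNACIONAL',
--     'NACIONAL',
--     'SX',
--     'UNIQUE',
--     'PLATINUM'
-- ]
--
-- mn_card_companies = [
--     'VISA', 'ELO', 'MASTER'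
-- ]
--
-- def marketing_name(my_list):
--     """
--     Create features from a list of marketing_names.
--     It uses mn_providers, mn_card_level and mn_card_type
--     to create the features.
--
--     Parameters
--     ----------
--     my_list : list
--         List of marketing_names
--     Returns
--     -------
--     dict
--         Features created
--     """
--     features = {}
--     my_list = [item.upper() for item in my_list if item]
--
--     for provider in mn_providers:
--         features['provider_' + provider] = any([provider in item for item in my_list])
--
--     for level in mn_levels:
--         features['level_' + level] = any([level in item for item in my_list])
--
--     for company in mn_card_companies:
--         features['company_' + company] = any([company in item for item in my_list])
--
--     return {'marketing_name.' + k:v for k,v in features.items()}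
-- ===== SOURCE B (Python) =====
-- mn_providers = [
--      'AADVANTAGE', 'CAIXA', 'DECOLAR', 'DOTZ', 'NEO',
--      'OUROCARD', 'PRIVATE', 'SANTANDER', 'SMILES'
-- ]
--
-- mn_levels = [
--     'BASICO', 'ELITE', 'FIT', 'GOLD', 'INTERNACIONAL',
--     'NACIONAL', 'SX', 'UNIQUE', 'PLATINUM'
-- ]
--
-- mn_card_companies = ['VISA', 'ELO', 'MASTER']
--
-- _KEYWORDS = ([('provider_', p) for p in mn_providers]
--              + [('level_', l) for l in mn_levels]
--              + [('company_', c) for c in mn_card_companies])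
-- _KWSET = {kw for _, kw in _KEYWORDS}
-- _MAXLEN = max(len(kw) for _, kw in _KEYWORDS)
--
--
-- def _scan(found, s):
--     """Enumerate every substring of s no longer than the longest keyword and
--     record in `found` the ones that are keywords (set lookup, no per-keyword search)."""
--     for i in range(len(s)):
--         for j in range(i + 1, min(i + _MAXLEN, len(s)) + 1):
--             sub = s[i:j]
--             if sub in _KWSET:
--                 found.add(sub)
--     return found
--
--
-- def marketing_name(my_list):
--     """Instead of testing each keyword against each item, enumerate the (length-bounded)
--     substrings of the items once and look them up in a keyword set; read every flag off
--     the resulting found-set at the end."""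
--     items = [x.upper() for x in my_list if x]
--     found = set()
--     for s in items:
--         found = _scan(found, s)
--     return {'marketing_name.' + pre + kw: kw in found for pre, kw in _KEYWORDS}
-- ===== Notes on version B (the rewrite author's own statement) =====
-- stated objective: alternative
-- what changed: B replaces A's 21 per-keyword substring searches over the whole list by enumerating each item's substrings (bounded by the longest keyword) once and looking them up in a keyword set, then reading all flags off the accumulated found-set.
import Mathlib
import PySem

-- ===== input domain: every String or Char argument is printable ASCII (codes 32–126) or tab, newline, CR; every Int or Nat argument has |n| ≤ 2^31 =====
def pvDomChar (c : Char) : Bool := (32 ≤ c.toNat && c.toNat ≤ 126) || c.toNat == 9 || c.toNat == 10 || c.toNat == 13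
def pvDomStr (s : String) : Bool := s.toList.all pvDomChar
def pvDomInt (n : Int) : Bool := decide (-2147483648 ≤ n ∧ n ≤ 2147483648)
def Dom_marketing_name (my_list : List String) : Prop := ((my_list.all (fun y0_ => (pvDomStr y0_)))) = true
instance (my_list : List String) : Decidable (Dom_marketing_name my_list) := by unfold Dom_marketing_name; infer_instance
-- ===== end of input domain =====

-- B replaces A's per-keyword substring searches over the list by one enumeration of each
-- item's length-bounded substrings looked up in a keyword set (objective: alternative).

-- ===== PORT A =====
def mnProviders : List String :=
  ["AADVANTAGE","CAIXA","DECOLAR","DOTZ","NEO","OUROCARD","PRIVATE","SANTANDER","SMILES"]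
def mnLevels : List String :=
  ["BASICO","ELITE","FIT","GOLD","INTERNACIONAL","NACIONAL","SX","UNIQUE","PLATINUM"]
def mnCardCompanies : List String := ["VISA","ELO","MASTER"]

def marketing_name (my_list : List String) : List (String × Bool) :=
  -- features = {}
  let features : PySem.Dict String Bool := PySem.Dict.empty
  -- my_list = [item.upper() for item in my_list if item]
  let myList := (my_list.filter (fun item => item != "")).map PySem.Str.upper
  -- for provider in mn_providers: features['provider_'+provider] = any([...])
  let features := mnProviders.foldl (fun f provider =>
      f.insert ("provider_" ++ provider)
        ((myList.map (fun item => PySem.Str.isIn provider item)).any id)) features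
  let features := mnLevels.foldl (fun f level =>
      f.insert ("level_" ++ level)
        ((myList.map (fun item => PySem.Str.isIn level item)).any id)) features
  let features := mnCardCompanies.foldl (fun f company =>
      f.insert ("company_" ++ company)
        ((myList.map (fun item => PySem.Str.isIn company item)).any id)) features
  -- return {'marketing_name.' + k: v for k, v in features.items()}
  features.items.map (fun kv => ("marketing_name." ++ kv.1, kv.2))

-- ===== PORT B =====
-- _KEYWORDS = [('provider_', p) ...] + [('level_', l) ...] + [('company_', c) ...]
def mnKeywordPairs : List (String × String) :=
  mnProviders.map (fun p => ("provider_", p))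
    ++ mnLevels.map (fun l => ("level_", l))
    ++ mnCardCompanies.map (fun c => ("company_", c))
-- _KWSET = {kw for _, kw in _KEYWORDS}
def mnKwSet : PySem.Set String := PySem.Set.ofList (mnKeywordPairs.map (fun p => p.2))
-- _MAXLEN = max(len(kw) for _, kw in _KEYWORDS)   (the literal list is nonempty, max returns)
def mnMaxLen : Int :=
  (PySem.List.max? (mnKeywordPairs.map (fun p => PySem.Str.len p.2)) (fun x => x)).getD 0

-- _scan(found, s): substring enumeration; 'sub = s[i:j]' is inlined into the test and the add
def mnScan (found : PySem.Set String) (s : String) : PySem.Set String :=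
  (PySem.List.pyRange 0 (PySem.Str.len s)).foldl (fun f i =>
    (PySem.List.pyRange (i + 1) (min (i + mnMaxLen) (PySem.Str.len s) + 1)).foldl (fun f2 j =>
      if PySem.Set.contains mnKwSet (PySem.Str.slice s (some i) (some j))
      then PySem.Set.add f2 (PySem.Str.slice s (some i) (some j)) else f2) f) found

def marketing_name_alt (my_list : List String) : List (String × Bool) :=
  -- items = [x.upper() for x in my_list if x]
  let items := (my_list.filter (fun x => x != "")).map PySem.Str.upper
  -- found = set(); for s in items: found = _scan(found, s)
  let found := items.foldl mnScan PySem.Set.empty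
  -- {'marketing_name.' + pre + kw: kw in found for pre, kw in _KEYWORDS}
  mnKeywordPairs.map (fun p => ("marketing_name." ++ p.1 ++ p.2, PySem.Set.contains found p.2))

-- ===== PRECONDITION & SPEC =====
def Spec_marketing_name (my_list : List String) (out : List (String × Bool)) : Prop := out = marketing_name_alt my_list
instance (my_list : List String) (out : List (String × Bool)) : Decidable (Spec_marketing_name my_list out) := by unfold Spec_marketing_name; infer_instance

-- ===== CLAIM (what is proved, stated in full; the proofs are below) =====
def Claim_equal_marketing_name : Prop := ∀ (my_list : List String), Dom_marketing_name my_list → Spec_marketing_name my_list (marketing_name my_list)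

-- ===== LEMMAS AND PROOFS =====

-- a fold whose step only grows the set by elements satisfying Q accumulates exactly those elements
theorem mem_foldl_grow {ι : Type} (step : PySem.Set String → ι → PySem.Set String)
    (Q : ι → String → Prop)
    (h : ∀ f i y, y ∈ step f i ↔ y ∈ f ∨ Q i y) :
    ∀ (l : List ι) (f : PySem.Set String) (y : String),
      y ∈ l.foldl step f ↔ y ∈ f ∨ ∃ i ∈ l, Q i y := by
  intro l
  induction l with
  | nil => simp
  | cons x t ih =>
    intro f y
    simp only [List.foldl_cons, ih, h f x y, List.mem_cons]
    constructor
    · rintro ((hf | hq) | ⟨i, hi, hq⟩)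
      · exact Or.inl hf
      · exact Or.inr ⟨x, Or.inl rfl, hq⟩
      · exact Or.inr ⟨i, Or.inr hi, hq⟩
    · rintro (hf | ⟨i, (rfl | hi), hq⟩)
      · exact Or.inl (Or.inl hf)
      · exact Or.inl (Or.inr hq)
      · exact Or.inr ⟨i, hi, hq⟩

-- membership after one conditional add
theorem mem_condAdd (P : String → Bool) (f2 : PySem.Set String) (sub y : String) :
    (y ∈ if P sub then PySem.Set.add f2 sub else f2) ↔ y ∈ f2 ∨ (sub = y ∧ P y = true) := by
  split_ifs with hp
  · rw [PySem.Set.mem_add]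
    constructor
    · rintro (hf | rfl)
      · exact Or.inl hf
      · exact Or.inr ⟨rfl, hp⟩
    · rintro (hf | ⟨rfl, _⟩)
      · exact Or.inl hf
      · exact Or.inr rfl
  · constructor
    · exact Or.inl
    · rintro (hf | ⟨rfl, hy⟩)
      · exact hf
      · exact absurd hy (by simp [hp])

-- what one _scan pass adds: exactly the keyword substrings of s
theorem mem_mnScan (f : PySem.Set String) (s : String) (y : String) :
    y ∈ mnScan f s ↔ y ∈ f ∨
      ∃ i ∈ PySem.List.pyRange 0 (PySem.Str.len s),
        ∃ j ∈ PySem.List.pyRange (i + 1) (min (i + mnMaxLen) (PySem.Str.len s) + 1),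
          PySem.Str.slice s (some i) (some j) = y ∧ PySem.Set.contains mnKwSet y = true := by
  unfold mnScan
  refine mem_foldl_grow _
    (fun i y => ∃ j ∈ PySem.List.pyRange (i + 1) (min (i + mnMaxLen) (PySem.Str.len s) + 1),
      PySem.Str.slice s (some i) (some j) = y ∧ PySem.Set.contains mnKwSet y = true) ?_ _ f y
  intro f' i y'
  exact mem_foldl_grow _
    (fun j y => PySem.Str.slice s (some i) (some j) = y ∧ PySem.Set.contains mnKwSet y = true)
    (fun f2 j y2 => mem_condAdd (PySem.Set.contains mnKwSet) f2 _ y2) _ f' y'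

-- the enumerated substrings of s are exactly its nonempty infixes of length ≤ mnMaxLen
theorem slice_exists_iff (kw s : String) (hk1 : 1 ≤ kw.toList.length)
    (hk2 : (kw.toList.length : Int) ≤ mnMaxLen) :
    (∃ i ∈ PySem.List.pyRange 0 (PySem.Str.len s),
        ∃ j ∈ PySem.List.pyRange (i + 1) (min (i + mnMaxLen) (PySem.Str.len s) + 1),
          PySem.Str.slice s (some i) (some j) = kw)
      ↔ PySem.Str.isIn kw s = true := by
  rw [PySem.Str.isIn_iff_infix]
  constructor
  · rintro ⟨i, hi, j, hj, heq⟩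
    rw [PySem.List.mem_pyRange_one] at hi hj
    obtain ⟨a, rfl⟩ : ∃ a : Nat, i = (a : Int) := ⟨i.toNat, (Int.toNat_of_nonneg hi.1).symm⟩
    obtain ⟨b, rfl⟩ : ∃ b : Nat, j = (b : Int) := ⟨j.toNat, (Int.toNat_of_nonneg (by omega)).symm⟩
    have hsl : (PySem.Str.slice s (some (a : Int)) (some (b : Int))).toList
        = (s.toList.drop a).take (b - a) := by
      simp [PySem.Str.slice, PySem.List.slice_natCast]
    rw [← heq, hsl]
    exact (List.take_prefix (b - a) (s.toList.drop a)).isInfix.trans (s.toList.drop_suffix a).isInfix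
  · intro h
    obtain ⟨t, ht, hs⟩ := List.infix_iff_prefix_suffix.mp h
    have e := List.suffix_iff_eq_drop.mp hs
    set a := s.toList.length - t.length with ha
    have htake : (s.toList.drop a).take kw.toList.length = kw.toList := by
      rw [← e, ← List.prefix_iff_eq_take.mp ht]
    have hlen : a + kw.toList.length ≤ s.toList.length := by
      have h1 := hs.length_le
      have h2 := ht.length_le
      omega
    set b := a + kw.toList.length with hb
    refine ⟨(a : Int), ?_, ((b : Nat) : Int), ?_, ?_⟩
    · rw [PySem.List.mem_pyRange_one, PySem.Str.len_eq]
      constructor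
      · exact Int.natCast_nonneg a
      · exact_mod_cast by omega
    · rw [PySem.List.mem_pyRange_one, PySem.Str.len_eq]
      omega
    · apply String.toList_inj.mp
      have hsl : (PySem.Str.slice s (some (a : Int)) (some (b : Int))).toList
          = (s.toList.drop a).take (b - a) := by
        simp [PySem.Str.slice, PySem.List.slice_natCast]
      rw [hsl, show b - a = kw.toList.length by omega, htake]

-- the found-set read off for a keyword equals A's any-over-items flag
theorem contains_found (my_list : List String) (kw : String)
    (hset : PySem.Set.contains mnKwSet kw = true)
    (hk1 : 1 ≤ kw.toList.length) (hk2 : (kw.toList.length : Int) ≤ mnMaxLen) :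
    PySem.Set.contains
        (((my_list.filter (fun x => x != "")).map PySem.Str.upper).foldl mnScan PySem.Set.empty) kw
      = ((my_list.filter (fun x => x != "")).map PySem.Str.upper).any (fun item => PySem.Str.isIn kw item) := by
  apply Bool.coe_iff_coe.mp
  unfold PySem.Set.contains
  rw [List.contains_iff_mem, List.any_eq_true]
  rw [mem_foldl_grow mnScan
    (fun s y => (∃ i ∈ PySem.List.pyRange 0 (PySem.Str.len s),
        ∃ j ∈ PySem.List.pyRange (i + 1) (min (i + mnMaxLen) (PySem.Str.len s) + 1),
          PySem.Str.slice s (some i) (some j) = y ∧ PySem.Set.contains mnKwSet y = true))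
    (fun f s y => mem_mnScan f s y)]
  simp only [PySem.Set.empty, List.not_mem_nil, false_or]
  constructor
  · rintro ⟨s, hsmem, i, hi, j, hj, heq, -⟩
    exact ⟨s, hsmem, (slice_exists_iff kw s hk1 hk2).mp ⟨i, hi, j, hj, heq⟩⟩
  · rintro ⟨s, hsmem, hin⟩
    obtain ⟨i, hi, j, hj, heq⟩ := (slice_exists_iff kw s hk1 hk2).mpr hin
    exact ⟨s, hsmem, i, hi, j, hj, heq, hset⟩

-- ===== VERDICT (by name: the statement is the Claim_ definition above) =====
theorem marketing_name_spec : Claim_equal_marketing_name := by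
  intro my_list _
  unfold Spec_marketing_name marketing_name marketing_name_alt
  simp only [mnKeywordPairs, mnProviders, mnLevels, mnCardCompanies, List.map_cons, List.map_nil, List.cons_append, List.nil_append]
  simp only [contains_found my_list "AADVANTAGE" (by decide) (by decide) (by decide),
    contains_found my_list "CAIXA" (by decide) (by decide) (by decide),
    contains_found my_list "DECOLAR" (by decide) (by decide) (by decide),
    contains_found my_list "DOTZ" (by decide) (by decide) (by decide),
    contains_found my_list "NEO" (by decide) (by decide) (by decide),
    contains_found my_list "OUROCARD" (by decide) (by decide) (by decide),
    contains_found my_list "PRIVATE" (by decide) (by decide) (by decide),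
    contains_found my_list "SANTANDER" (by decide) (by decide) (by decide),
    contains_found my_list "SMILES" (by decide) (by decide) (by decide),
    contains_found my_list "BASICO" (by decide) (by decide) (by decide),
    contains_found my_list "ELITE" (by decide) (by decide) (by decide),
    contains_found my_list "FIT" (by decide) (by decide) (by decide),
    contains_found my_list "GOLD" (by decide) (by decide) (by decide),
    contains_found my_list "INTERNACIONAL" (by decide) (by decide) (by decide),
    contains_found my_list "NACIONAL" (by decide) (by decide) (by decide),
    contains_found my_list "SX" (by decide) (by decide) (by decide),
    contains_found my_list "UNIQUE" (by decide) (by decide) (by decide),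
    contains_found my_list "PLATINUM" (by decide) (by decide) (by decide),
    contains_found my_list "VISA" (by decide) (by decide) (by decide),
    contains_found my_list "ELO" (by decide) (by decide) (by decide),
    contains_found my_list "MASTER" (by decide) (by decide) (by decide)]
  simp [PySem.Dict.empty, PySem.Dict.insert, List.any_map, Function.comp]
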